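-- pv_equiv track=rewrite | github.com/schiob/TestingSistemas | ago-dic-2018/Ruben Campos/Práctica 2/contar.py | funcionpro
-- ===== SOURCE A (Python) =====
-- def funcionpro(n, numeros):
--     positivos = negativos = impares = pares = 0
--     if len(numeros) != n:
--         raise SystemExit("Error, tienes que teclear {} numero(s) para proceder".format(n))
--     for x in numeros:
--         if x > 0:
--             positivos+=1
--         elif x < 0:
--             negativos+=1
--         if x % 2:
--             impares+=1
--         else:
--             pares+=1
--     return positivos, negativos, pares, impares, n
-- ===== SOURCE B (Python) =====
-- def funcionpro(n, numeros):
--     if len(numeros) != n: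
--         raise SystemExit("Error, tienes que teclear {} numero(s) para proceder".format(n))
--     positivos = sum(1 for x in numeros if x > 0)
--     negativos = sum(1 for x in numeros if x < 0)
--     pares = sum(1 for x in numeros if x % 2 == 0)
--     impares = sum(1 for x in numeros if x % 2)
--     return positivos, negativos, pares, impares, n
-- ===== Notes on version B (the rewrite author's own statement) =====
-- stated objective: simpler
-- what changed: Replaces the single fused counting loop with four-way mutable state by four independent one-line aggregations (sum over a filtered generator) for positives, negatives, evens and odds.
import Mathlib
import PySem

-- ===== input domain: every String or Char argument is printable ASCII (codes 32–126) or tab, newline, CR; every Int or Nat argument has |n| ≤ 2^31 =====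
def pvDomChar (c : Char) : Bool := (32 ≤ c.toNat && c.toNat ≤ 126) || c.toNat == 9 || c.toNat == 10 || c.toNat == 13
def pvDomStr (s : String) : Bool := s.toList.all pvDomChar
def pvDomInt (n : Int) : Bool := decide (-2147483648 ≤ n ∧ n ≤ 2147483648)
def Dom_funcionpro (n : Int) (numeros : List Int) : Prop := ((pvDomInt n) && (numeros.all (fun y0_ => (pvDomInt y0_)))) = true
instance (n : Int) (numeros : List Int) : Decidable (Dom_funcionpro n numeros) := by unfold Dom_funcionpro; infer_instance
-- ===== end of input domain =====

-- B replaces A's single fused counting loop by four independent one-line aggregations (simpler decomposition, same O(n) cost).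

-- ===== PORT A =====
-- one pass, fused accumulator (positivos, negativos, impares, pares), branches in A's order
def pvStepA (s : Int × Int × Int × Int) (x : Int) : Int × Int × Int × Int :=
  let (positivos, negativos, impares, pares) := s
  let (positivos, negativos) :=
    if x > 0 then (positivos + 1, negativos)
    else if x < 0 then (positivos, negativos + 1)
    else (positivos, negativos)
  if PySem.Int.mod x 2 ≠ 0 then (positivos, negativos, impares + 1, pares)
  else (positivos, negativos, impares, pares + 1)

def funcionpro (n : Int) (numeros : List Int) : Int × Int × Int × Int × Int :=
  let st := numeros.foldl pvStepA (0, 0, 0, 0)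
  (st.1, st.2.1, st.2.2.2, st.2.2.1, n)

-- ===== PORT B =====
-- four independent scans (sum(1 for x in numeros if P x) = length of filter)
def funcionpro_alt (n : Int) (numeros : List Int) : Int × Int × Int × Int × Int :=
  let positivos : Int := ((numeros.filter (fun x => x > 0)).length : Int)
  let negativos : Int := ((numeros.filter (fun x => x < 0)).length : Int)
  let pares : Int := ((numeros.filter (fun x => PySem.Int.mod x 2 == 0)).length : Int)
  let impares : Int := ((numeros.filter (fun x => PySem.Int.mod x 2 != 0)).length : Int)
  (positivos, negativos, pares, impares, n)

-- ===== PRECONDITION & SPEC =====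
-- Pre_ excludes exactly the inputs where A raises SystemExit (len(numeros) != n); B raises there too.
def Pre_funcionpro (n : Int) (numeros : List Int) : Prop := (numeros.length : Int) = n
instance (n : Int) (numeros : List Int) : Decidable (Pre_funcionpro n numeros) := by unfold Pre_funcionpro; infer_instance
def pvWitness_funcionpro : Int × List Int := (3, [1, -2, 0])

def Spec_funcionpro (n : Int) (numeros : List Int) (out : Int × Int × Int × Int × Int) : Prop := out = funcionpro_alt n numeros
instance (n : Int) (numeros : List Int) (out : Int × Int × Int × Int × Int) : Decidable (Spec_funcionpro n numeros out) := by unfold Spec_funcionpro; infer_instance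

-- ===== CLAIM (what is proved, stated in full; the proofs are below) =====
def Claim_equal_funcionpro : Prop := ∀ (n : Int) (numeros : List Int), Dom_funcionpro n numeros → Pre_funcionpro n numeros → Spec_funcionpro n numeros (funcionpro n numeros)

-- ===== LEMMAS AND PROOFS =====

-- invariant of A's fused fold: it adds the four filter-counts to the accumulator
theorem funcionpro_fold_inv (numeros : List Int) (p q i e : Int) :
    numeros.foldl pvStepA (p, q, i, e)
    = (p + ((numeros.filter (fun x => x > 0)).length : Int),
       q + ((numeros.filter (fun x => x < 0)).length : Int),
       i + ((numeros.filter (fun x => PySem.Int.mod x 2 != 0)).length : Int),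
       e + ((numeros.filter (fun x => PySem.Int.mod x 2 == 0)).length : Int)) := by
  induction numeros generalizing p q i e with
  | nil => simp
  | cons x xs ih =>
    have hm : PySem.Int.mod x 2 = x % 2 := PySem.Int.mod_eq_emod_of_pos (by norm_num)
    have hstep : ∀ a b c d : Int, pvStepA (a, b, c, d) x
        = (a + (if x > 0 then 1 else 0), b + (if ¬ x > 0 ∧ x < 0 then 1 else 0),
           c + (if x % 2 = 1 then 1 else 0), d + (if x % 2 = 0 then 1 else 0)) := by
      intro a b c d
      by_cases h2 : x % 2 = 0
      · by_cases hp : x > 0 <;> by_cases hn : x < 0 <;> simp [pvStepA, hm, h2, hp, hn]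
      · have h1 : x % 2 = 1 := by omega
        by_cases hp : x > 0 <;> by_cases hn : x < 0 <;> simp [pvStepA, hm, h1, hp, hn]
    rw [List.foldl_cons, hstep, ih]
    simp only [List.filter_cons, hm]
    by_cases h2 : x % 2 = 0
    · by_cases hp : x > 0 <;> by_cases hn : x < 0 <;>
        simp [h2, hp, hn, Prod.ext_iff] <;> omega
    · have h1 : x % 2 = 1 := by omega
      by_cases hp : x > 0 <;> by_cases hn : x < 0 <;>
        simp [h1, hp, hn, Prod.ext_iff] <;> omega

-- ===== VERDICT (by name: the statement is the Claim_ definition above) =====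
theorem funcionpro_spec : Claim_equal_funcionpro := by
  intro n numeros _ _
  unfold Spec_funcionpro funcionpro funcionpro_alt
  rw [funcionpro_fold_inv]
  simp
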